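-- pv_equiv track=rewrite | github.com/fw-ai/benchmark | llm_bench/gen_load_test.py | get_profile_batch_sizes
-- ===== SOURCE A (Python) =====
-- _FAST_BATCH_SIZES = [1, 2, 3, 4, 5, 6, 7, 8]
--
-- def get_profile_batch_sizes(max_batch_size: int) -> list[int]:
--     r = [b for b in _FAST_BATCH_SIZES if b <= max_batch_size]
--     if not r:
--         return [max_batch_size]
--
--     step = 4
--     b = r[-1] + step
--     while b <= max_batch_size:
--         r.append(b)
--         if (b & (b - 1)) == 0:
--             if 32 <= b < 128:
--                 step = 16
--             else:
--                 step = b // 2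
--         b += step
--
--     if r[-1] != max_batch_size:
--         r.append(max_batch_size)
--
--     return r
-- ===== SOURCE B (Python) =====
-- _FAST_BATCH_SIZES = [1, 2, 3, 4, 5, 6, 7, 8]
--
-- def get_profile_batch_sizes(max_batch_size: int) -> list[int]:
--     r = [b for b in _FAST_BATCH_SIZES if b <= max_batch_size]
--     if not r:
--         return [max_batch_size]
--
--     # walk power-of-two regions [q, 2q]: each region contributes the
--     # arithmetic progression q+step, q+2*step, ..., 2q of profile points
--     q = 8
--     done = False
--     while not done and q <= max_batch_size:
--         step = 4 if q == 8 else (16 if 32 <= q < 128 else q // 2)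
--         v = q + step
--         while v <= 2 * q:
--             if max_batch_size < v:
--                 done = True
--                 break
--             r.append(v)
--             v += step
--         q *= 2
--
--     if r[-1] != max_batch_size:
--         r.append(max_batch_size)
--     return r
-- ===== Notes on version B (the rewrite author's own statement) =====
-- stated objective: alternative
-- what changed: Replaces A's single mutable-step while loop (which re-tests each appended value for power-of-two-ness with b&(b-1) to update the step) by a nested pass over doubling regions [q,2q]: the step is computed once per region from q and the region's arithmetic progression is emitted by an inner loop.
import Mathlib
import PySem

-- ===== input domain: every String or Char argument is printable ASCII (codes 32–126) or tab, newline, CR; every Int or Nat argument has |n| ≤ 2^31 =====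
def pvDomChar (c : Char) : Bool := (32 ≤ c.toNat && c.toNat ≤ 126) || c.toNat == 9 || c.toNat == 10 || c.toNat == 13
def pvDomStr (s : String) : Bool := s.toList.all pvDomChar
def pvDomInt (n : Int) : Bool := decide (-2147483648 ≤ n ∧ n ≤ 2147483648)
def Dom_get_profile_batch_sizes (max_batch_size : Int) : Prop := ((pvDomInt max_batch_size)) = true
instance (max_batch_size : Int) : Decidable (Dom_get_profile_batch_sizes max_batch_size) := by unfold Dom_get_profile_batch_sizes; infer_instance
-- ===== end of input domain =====

-- B replaces A's single mutable-step loop by a nested pass over power-of-two regions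
-- [q,2q] whose step is computed once per region (objective: alternative decomposition).
-- A only mutates its local list r; return values are what is compared.

-- ===== PORT A =====
-- the module constant _FAST_BATCH_SIZES (used by both sources)
def pvFast : List Int := [1, 2, 3, 4, 5, 6, 7, 8]

-- A's in-loop step update: `if (b & (b-1)) == 0: step = 16 if 32 <= b < 128 else b // 2`
def pvStepA (b step : Int) : Int :=
  if Int.land b (b - 1) = 0 then (if 32 ≤ b ∧ b < 128 then 16 else PySem.Int.floordiv b 2) else step

-- A's while loop.  The `1 ≤ pvStepA b step` conjunct only makes the recursion total:
-- on a state with b ≤ maxb and a non-positive updated step Python appends b and then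
-- loops forever; such states are never reached from A's entry (step starts at 4 and
-- every later value of step is 16 or b//2 ≥ 2).
def pvLoopA (maxb b step : Int) (r : List Int) : List Int :=
  if _h : b ≤ maxb ∧ 1 ≤ pvStepA b step then
    pvLoopA maxb (b + pvStepA b step) (pvStepA b step) (r ++ [b])
  else if b ≤ maxb then r ++ [b] else r
termination_by (maxb + 1 - b).toNat
decreasing_by
  obtain ⟨h1, h2⟩ := _h
  omega

-- A's trailing `if r[-1] != max_batch_size: r.append(max_batch_size)` (r ≠ [] there)
def pvEndA (m : Int) (r : List Int) : List Int :=
  if r.getLastD 0 ≠ m then r ++ [m] else r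

-- body of A after the comprehension (r[-1] is read on a branch where r ≠ [])
def pvMainA (m : Int) (r : List Int) : List Int :=
  if r = [] then [m]
  else pvEndA m (pvLoopA m (r.getLastD 0 + 4) 4 r)

def get_profile_batch_sizes (max_batch_size : Int) : List Int :=
  pvMainA max_batch_size (pvFast.filter (fun b => decide (b ≤ max_batch_size)))

-- ===== PORT B =====
-- B's per-region step: `4 if q == 8 else (16 if 32 <= q < 128 else q // 2)`
def pvStepB (q : Int) : Int :=
  if q = 8 then 4 else if 32 ≤ q ∧ q < 128 then 16 else PySem.Int.floordiv q 2

-- B's inner while loop over one region: emits q+step, q+2*step, … while ≤ stop = 2q,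
-- returning (list, done); done = true means max_batch_size was passed (Python's break).
-- The `1 ≤ step` conjunct only makes the recursion total; B's steps are always ≥ 4.
def pvInner (maxb stop v step : Int) (r : List Int) : List Int × Bool :=
  if _h : v ≤ stop ∧ 1 ≤ step then
    if maxb < v then (r, true)
    else pvInner maxb stop (v + step) step (r ++ [v])
  else (r, false)
termination_by (stop + 1 - v).toNat
decreasing_by
  obtain ⟨h1, h2⟩ := _h
  omega

-- B's outer while loop over doubling regions (`while not done and q <= max_batch_size`)
def pvOuter (maxb q : Int) (r : List Int) : List Int :=
  if _h : 1 ≤ q ∧ q ≤ maxb then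
    let p := pvInner maxb (2 * q) (q + pvStepB q) (pvStepB q) r
    if p.2 then p.1 else pvOuter maxb (2 * q) p.1
  else r
termination_by (maxb + 1 - q).toNat
decreasing_by
  obtain ⟨h1, h2⟩ := _h
  omega

-- B's trailing `if r[-1] != max_batch_size: r.append(max_batch_size)` (r ≠ [] there)
def pvEndB (m : Int) (r : List Int) : List Int :=
  if r.getLastD 0 ≠ m then r ++ [m] else r

-- body of B after the comprehension
def pvMainB (m : Int) (r : List Int) : List Int :=
  if r = [] then [m]
  else pvEndB m (pvOuter m 8 r)

def get_profile_batch_sizes_alt (max_batch_size : Int) : List Int :=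
  pvMainB max_batch_size (pvFast.filter (fun b => decide (b ≤ max_batch_size)))

-- ===== PRECONDITION & SPEC =====
def Spec_get_profile_batch_sizes (max_batch_size : Int) (out : List Int) : Prop := out = get_profile_batch_sizes_alt max_batch_size
instance (max_batch_size : Int) (out : List Int) : Decidable (Spec_get_profile_batch_sizes max_batch_size out) := by unfold Spec_get_profile_batch_sizes; infer_instance

-- ===== CLAIM (what is proved, stated in full; the proofs are below) =====
def Claim_equal_get_profile_batch_sizes : Prop := ∀ (max_batch_size : Int), Dom_get_profile_batch_sizes max_batch_size → Spec_get_profile_batch_sizes max_batch_size (get_profile_batch_sizes max_batch_size)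

-- ===== LEMMAS AND PROOFS =====

-- single-step unfolding lemmas for the four loops
theorem loopA_cons (maxb b step : Int) (r : List Int) (h1 : b ≤ maxb)
    (h2 : 1 ≤ pvStepA b step) :
    pvLoopA maxb b step r = pvLoopA maxb (b + pvStepA b step) (pvStepA b step) (r ++ [b]) := by
  rw [pvLoopA, dif_pos ⟨h1, h2⟩]

theorem loopA_stop (maxb b step : Int) (r : List Int) (h1 : ¬ b ≤ maxb) :
    pvLoopA maxb b step r = r := by
  rw [pvLoopA, dif_neg (fun hc => h1 hc.1), if_neg h1]

theorem inner_step (maxb stop v step : Int) (r : List Int) (h1 : v ≤ stop) (h2 : 1 ≤ step)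
    (h3 : ¬ maxb < v) :
    pvInner maxb stop v step r = pvInner maxb stop (v + step) step (r ++ [v]) := by
  rw [pvInner, dif_pos ⟨h1, h2⟩, if_neg h3]

theorem inner_done (maxb stop v step : Int) (r : List Int) (h1 : v ≤ stop) (h2 : 1 ≤ step)
    (h3 : maxb < v) :
    pvInner maxb stop v step r = (r, true) := by
  rw [pvInner, dif_pos ⟨h1, h2⟩, if_pos h3]

theorem inner_exit (maxb stop v step : Int) (r : List Int) (h1 : ¬ v ≤ stop) :
    pvInner maxb stop v step r = (r, false) := by
  rw [pvInner, dif_neg (fun hc => h1 hc.1)]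

theorem outer_stop (maxb q : Int) (r : List Int) (h : ¬ q ≤ maxb) :
    pvOuter maxb q r = r := by
  rw [pvOuter, dif_neg (fun hc => h hc.2)]

theorem outer_step (maxb q : Int) (r : List Int) (h1 : 1 ≤ q) (h2 : q ≤ maxb) :
    pvOuter maxb q r =
      (if (pvInner maxb (2 * q) (q + pvStepB q) (pvStepB q) r).2
       then (pvInner maxb (2 * q) (q + pvStepB q) (pvStepB q) r).1
       else pvOuter maxb (2 * q) (pvInner maxb (2 * q) (q + pvStepB q) (pvStepB q) r).1) := by
  rw [pvOuter, dif_pos ⟨h1, h2⟩]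

-- bit facts: 2^k & (2^k - 1) = 0 and 3·2^m & (3·2^m - 1) ≠ 0
theorem nat_two_pow_land (k : Nat) : 2 ^ k &&& (2 ^ k - 1) = 0 := by
  simp [Nat.and_two_pow_sub_one_eq_mod]

theorem int_two_pow_land (k : Nat) : Int.land ((2 : Int) ^ k) ((2 : Int) ^ k - 1) = 0 := by
  have hp : (1 : Nat) ≤ 2 ^ k := Nat.one_le_two_pow
  have h1 : ((2 : Int) ^ k) = ((2 ^ k : Nat) : Int) := by push_cast; ring
  have h2 : ((2 : Int) ^ k - 1) = ((2 ^ k - 1 : Nat) : Int) := by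
    rw [Nat.cast_sub hp]; push_cast; ring
  rw [h2, h1]
  have he : Int.land (((2 ^ k : Nat) : Int)) (((2 ^ k - 1 : Nat) : Int))
      = ((2 ^ k &&& (2 ^ k - 1) : Nat) : Int) := rfl
  rw [he, nat_two_pow_land]
  rfl

theorem nat_three_testBit (m : Nat) : (3 * 2 ^ m).testBit (m + 1) = true := by
  have hp : 0 < 2 ^ m := Nat.two_pow_pos m
  have hdiv : 3 * 2 ^ m / 2 ^ (m + 1) = 1 := by
    have he : 3 * 2 ^ m = 2 ^ (m + 1) * 1 + 2 ^ m := by ring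
    rw [he, Nat.mul_add_div (by positivity)]
    have : 2 ^ m / 2 ^ (m + 1) = 0 := Nat.div_eq_of_lt (by rw [pow_succ]; omega)
    omega
  rw [Nat.testBit_eq_decide_div_mod_eq, hdiv]
  rfl

theorem nat_three_pred_testBit (m : Nat) : (3 * 2 ^ m - 1).testBit (m + 1) = true := by
  have hp : 0 < 2 ^ m := Nat.two_pow_pos m
  have hs : 2 ^ (m + 1) = 2 * 2 ^ m := by ring
  have hdiv : (3 * 2 ^ m - 1) / 2 ^ (m + 1) = 1 := by
    have he : 3 * 2 ^ m - 1 = 2 ^ (m + 1) * 1 + (2 ^ m - 1) := by omega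
    rw [he, Nat.mul_add_div (by positivity)]
    have : (2 ^ m - 1) / 2 ^ (m + 1) = 0 := Nat.div_eq_of_lt (by omega)
    omega
  rw [Nat.testBit_eq_decide_div_mod_eq, hdiv]
  rfl

theorem int_three_land (m : Nat) :
    ¬ (Int.land (3 * (2 : Int) ^ m) (3 * (2 : Int) ^ m - 1) = 0) := by
  intro h
  have hp : (1 : Nat) ≤ 3 * 2 ^ m := by have := Nat.two_pow_pos m; omega
  have h1 : (3 * (2 : Int) ^ m) = ((3 * 2 ^ m : Nat) : Int) := by push_cast; ring
  have h2 : (3 * (2 : Int) ^ m - 1) = ((3 * 2 ^ m - 1 : Nat) : Int) := by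
    rw [Nat.cast_sub hp]; push_cast; ring
  rw [h2, h1] at h
  have h3 : (((3 * 2 ^ m &&& (3 * 2 ^ m - 1)) : Nat) : Int) = 0 := h
  have h4 : (3 * 2 ^ m &&& (3 * 2 ^ m - 1)) = 0 := by exact_mod_cast h3
  have h5 := Nat.testBit_land (3 * 2 ^ m) (3 * 2 ^ m - 1) (m + 1)
  rw [h4, Nat.zero_testBit, nat_three_testBit, nat_three_pred_testBit] at h5
  simp at h5

theorem fdiv_twice (x : Int) : PySem.Int.floordiv (2 * x) 2 = x := by
  rw [PySem.Int.floordiv_eq_iff_of_pos (by norm_num)]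
  constructor <;> omega

-- packaged single-step lemmas with the arithmetic done in side goals
theorem loopA_cons' (maxb b step b' step' : Int) (r : List Int) (h1 : b ≤ maxb)
    (h2 : pvStepA b step = step') (h3 : 1 ≤ step') (h4 : b + step' = b') :
    pvLoopA maxb b step r = pvLoopA maxb b' step' (r ++ [b]) := by
  rw [loopA_cons maxb b step r h1 (h2 ▸ h3), h2, h4]

theorem inner_step' (maxb stop v step v' : Int) (r : List Int) (h1 : v ≤ stop) (h2 : 1 ≤ step)
    (h3 : ¬ maxb < v) (h4 : v + step = v') :
    pvInner maxb stop v step r = pvInner maxb stop v' step (r ++ [v]) := by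
  rw [inner_step maxb stop v step r h1 h2 h3, h4]

theorem outer_step' (maxb q s v stop : Int) (r : List Int) (h1 : 1 ≤ q) (h2 : q ≤ maxb)
    (hs : pvStepB q = s) (hv : q + s = v) (hst : 2 * q = stop) :
    pvOuter maxb q r =
      (if (pvInner maxb stop v s r).2
       then (pvInner maxb stop v s r).1
       else pvOuter maxb stop (pvInner maxb stop v s r).1) := by
  rw [outer_step maxb q r h1 h2, hs, hv, hst]

theorem if_pair_true (maxb stop : Int) (R : List Int) :
    (if ((R, true) : List Int × Bool).2
     then ((R, true) : List Int × Bool).1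
     else pvOuter maxb stop ((R, true) : List Int × Bool).1) = R := rfl

theorem if_pair_false (maxb stop : Int) (R : List Int) :
    (if ((R, false) : List Int × Bool).2
     then ((R, false) : List Int × Bool).1
     else pvOuter maxb stop ((R, false) : List Int × Bool).1) = pvOuter maxb stop R := rfl

-- one doubling region [2·2^m, 4·2^m] (entered by A at b = 3·2^m with step 2^m),
-- assuming the continuation at the next region is already known
theorem Lstep (m : Nat) (maxb : Int) (r : List Int) (hm : 6 ≤ m)
    (hrec : 4 * (2 : Int) ^ m ≤ maxb →
      pvLoopA maxb (6 * (2 : Int) ^ m) (2 * (2 : Int) ^ m)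
          (r ++ [3 * (2 : Int) ^ m] ++ [4 * (2 : Int) ^ m]) =
      pvOuter maxb (4 * (2 : Int) ^ m) (r ++ [3 * (2 : Int) ^ m] ++ [4 * (2 : Int) ^ m])) :
    pvLoopA maxb (3 * (2 : Int) ^ m) ((2 : Int) ^ m) r = pvOuter maxb (2 * (2 : Int) ^ m) r := by
  have hA : (0 : Int) < (2 : Int) ^ m := pow_pos (by norm_num) m
  have h64 : (64 : Int) ≤ (2 : Int) ^ m := by
    calc (64 : Int) = (2 : Int) ^ 6 := by norm_num
    _ ≤ (2 : Int) ^ m := pow_le_pow_right₀ (by norm_num) hm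
  have hsA1 : pvStepA (3 * (2 : Int) ^ m) ((2 : Int) ^ m) = (2 : Int) ^ m := by
    unfold pvStepA; rw [if_neg (int_three_land m)]
  have hland2 : Int.land (4 * (2 : Int) ^ m) (4 * (2 : Int) ^ m - 1) = 0 := by
    have h := int_two_pow_land (m + 2)
    rw [show ((2 : Int)) ^ (m + 2) = 4 * (2 : Int) ^ m from by ring] at h
    exact h
  have hsA2 : pvStepA (4 * (2 : Int) ^ m) ((2 : Int) ^ m) = 2 * (2 : Int) ^ m := by
    unfold pvStepA
    rw [if_pos hland2,
        if_neg (by omega : ¬ ((32 : Int) ≤ 4 * (2 : Int) ^ m ∧ 4 * (2 : Int) ^ m < 128)),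
        show (4 : Int) * (2 : Int) ^ m = 2 * (2 * (2 : Int) ^ m) from by ring, fdiv_twice]
  have hsB : pvStepB (2 * (2 : Int) ^ m) = (2 : Int) ^ m := by
    unfold pvStepB
    rw [if_neg (by omega : ¬ ((2 : Int) * (2 : Int) ^ m = 8)),
        if_neg (by omega : ¬ ((32 : Int) ≤ 2 * (2 : Int) ^ m ∧ 2 * (2 : Int) ^ m < 128)),
        fdiv_twice]
  by_cases hq : 2 * (2 : Int) ^ m ≤ maxb
  · rw [outer_step' maxb (2 * (2 : Int) ^ m) ((2 : Int) ^ m) (3 * (2 : Int) ^ m)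
        (4 * (2 : Int) ^ m) r (by omega) hq hsB (by ring) (by ring)]
    by_cases hv1 : 3 * (2 : Int) ^ m ≤ maxb
    · have hI1 := inner_step' maxb (4 * (2 : Int) ^ m) (3 * (2 : Int) ^ m) ((2 : Int) ^ m)
        (4 * (2 : Int) ^ m) r (by omega) (by omega) (by omega) (by ring)
      by_cases hv2 : 4 * (2 : Int) ^ m ≤ maxb
      · have hI2 := inner_step' maxb (4 * (2 : Int) ^ m) (4 * (2 : Int) ^ m) ((2 : Int) ^ m)
          (4 * (2 : Int) ^ m + (2 : Int) ^ m) (r ++ [3 * (2 : Int) ^ m]) le_rfl (by omega)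
          (by omega) rfl
        have hI3 := inner_exit maxb (4 * (2 : Int) ^ m) (4 * (2 : Int) ^ m + (2 : Int) ^ m)
          ((2 : Int) ^ m) (r ++ [3 * (2 : Int) ^ m] ++ [4 * (2 : Int) ^ m]) (by omega)
        rw [hI1, hI2, hI3, if_pair_false]
        rw [loopA_cons' maxb (3 * (2 : Int) ^ m) ((2 : Int) ^ m) (4 * (2 : Int) ^ m)
            ((2 : Int) ^ m) r hv1 hsA1 (by omega) (by ring),
          loopA_cons' maxb (4 * (2 : Int) ^ m) ((2 : Int) ^ m) (6 * (2 : Int) ^ m)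
            (2 * (2 : Int) ^ m) (r ++ [3 * (2 : Int) ^ m]) hv2 hsA2 (by omega) (by ring)]
        exact hrec hv2
      · have hI2 := inner_done maxb (4 * (2 : Int) ^ m) (4 * (2 : Int) ^ m) ((2 : Int) ^ m)
          (r ++ [3 * (2 : Int) ^ m]) le_rfl (by omega) (by omega)
        rw [hI1, hI2, if_pair_true]
        rw [loopA_cons' maxb (3 * (2 : Int) ^ m) ((2 : Int) ^ m) (4 * (2 : Int) ^ m)
            ((2 : Int) ^ m) r hv1 hsA1 (by omega) (by ring),
          loopA_stop maxb (4 * (2 : Int) ^ m) ((2 : Int) ^ m) (r ++ [3 * (2 : Int) ^ m])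
            (by omega)]
    · have hI := inner_done maxb (4 * (2 : Int) ^ m) (3 * (2 : Int) ^ m) ((2 : Int) ^ m) r
        (by omega) (by omega) (by omega)
      rw [hI, if_pair_true, loopA_stop maxb (3 * (2 : Int) ^ m) ((2 : Int) ^ m) r (by omega)]
  · rw [outer_stop maxb (2 * (2 : Int) ^ m) r hq,
        loopA_stop maxb (3 * (2 : Int) ^ m) ((2 : Int) ^ m) r (by omega)]

-- all regions from 2^(m+1) on (m ≥ 6, i.e. from 128 on), by induction on the
-- number of remaining doublings below the bound
theorem Lgen (t : Nat) : ∀ (m : Nat) (maxb : Int) (r : List Int), 6 ≤ m →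
    maxb < 3 * (2 : Int) ^ m * (2 : Int) ^ t →
    pvLoopA maxb (3 * (2 : Int) ^ m) ((2 : Int) ^ m) r = pvOuter maxb ((2 : Int) ^ (m + 1)) r := by
  induction t with
  | zero =>
    intro m maxb r hm hb
    have hA : (0 : Int) < (2 : Int) ^ m := pow_pos (by norm_num) m
    rw [show ((2 : Int)) ^ (m + 1) = 2 * (2 : Int) ^ m from by ring]
    apply Lstep m maxb r hm
    intro h4
    exfalso
    rw [pow_zero, mul_one] at hb
    omega
  | succ t ih =>
    intro m maxb r hm hb
    rw [show ((2 : Int)) ^ (m + 1) = 2 * (2 : Int) ^ m from by ring]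
    apply Lstep m maxb r hm
    intro _
    have h := ih (m + 1) maxb (r ++ [3 * (2 : Int) ^ m] ++ [4 * (2 : Int) ^ m]) (by omega)
      (by rw [show (3 : Int) * (2 : Int) ^ (m + 1) * (2 : Int) ^ t
            = 3 * (2 : Int) ^ m * (2 : Int) ^ (t + 1) from by ring];
          exact hb)
    rw [show (3 : Int) * (2 : Int) ^ (m + 1) = 6 * (2 : Int) ^ m from by ring,
        show ((2 : Int)) ^ (m + 1) = 2 * (2 : Int) ^ m from by ring,
        show ((2 : Int)) ^ (m + 1 + 1) = 4 * (2 : Int) ^ m from by ring] at h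
    exact h

-- the region [64,128] (A enters it at b = 80 with step 16)
theorem L64 (maxb : Int) (r : List Int) (hd : maxb ≤ 2147483648) :
    pvLoopA maxb 80 16 r = pvOuter maxb 64 r := by
  by_cases h64 : (64 : Int) ≤ maxb
  · rw [outer_step' maxb 64 16 80 128 r (by norm_num) h64 (by decide) (by norm_num) (by norm_num)]
    by_cases h80 : (80 : Int) ≤ maxb
    · have hI1 := inner_step' maxb 128 80 16 96 r (by norm_num) (by norm_num) (by omega)
        (by norm_num)
      by_cases h96 : (96 : Int) ≤ maxb
      · have hI2 := inner_step' maxb 128 96 16 112 (r ++ [80]) (by norm_num) (by norm_num)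
          (by omega) (by norm_num)
        by_cases h112 : (112 : Int) ≤ maxb
        · have hI3 := inner_step' maxb 128 112 16 128 (r ++ [80] ++ [96]) (by norm_num)
            (by norm_num) (by omega) (by norm_num)
          by_cases h128 : (128 : Int) ≤ maxb
          · have hI4 := inner_step' maxb 128 128 16 144 (r ++ [80] ++ [96] ++ [112]) le_rfl
              (by norm_num) (by omega) (by norm_num)
            have hI5 := inner_exit maxb 128 144 16 (r ++ [80] ++ [96] ++ [112] ++ [128])
              (by norm_num)
            rw [hI1, hI2, hI3, hI4, hI5, if_pair_false]
            rw [loopA_cons' maxb 80 16 96 16 r h80 (by decide) (by norm_num) (by norm_num),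
                loopA_cons' maxb 96 16 112 16 (r ++ [80]) h96 (by decide) (by norm_num)
                  (by norm_num),
                loopA_cons' maxb 112 16 128 16 (r ++ [80] ++ [96]) h112 (by decide)
                  (by norm_num) (by norm_num),
                loopA_cons' maxb 128 16 192 64 (r ++ [80] ++ [96] ++ [112]) h128 (by decide)
                  (by norm_num) (by norm_num)]
            have hg := Lgen 26 6 maxb (r ++ [80] ++ [96] ++ [112] ++ [128]) (by norm_num)
              (by have : (3 : Int) * (2 : Int) ^ 6 * (2 : Int) ^ 26 = 12884901888 := by
                    norm_num
                  omega)
            norm_num at hg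
            simpa using hg
          · have hI4 := inner_done maxb 128 128 16 (r ++ [80] ++ [96] ++ [112]) le_rfl
              (by norm_num) (by omega)
            rw [hI1, hI2, hI3, hI4, if_pair_true]
            rw [loopA_cons' maxb 80 16 96 16 r h80 (by decide) (by norm_num) (by norm_num),
                loopA_cons' maxb 96 16 112 16 (r ++ [80]) h96 (by decide) (by norm_num)
                  (by norm_num),
                loopA_cons' maxb 112 16 128 16 (r ++ [80] ++ [96]) h112 (by decide)
                  (by norm_num) (by norm_num),
                loopA_stop maxb 128 16 (r ++ [80] ++ [96] ++ [112]) (by omega)]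
        · have hI3 := inner_done maxb 128 112 16 (r ++ [80] ++ [96]) (by norm_num) (by norm_num)
            (by omega)
          rw [hI1, hI2, hI3, if_pair_true]
          rw [loopA_cons' maxb 80 16 96 16 r h80 (by decide) (by norm_num) (by norm_num),
              loopA_cons' maxb 96 16 112 16 (r ++ [80]) h96 (by decide) (by norm_num)
                (by norm_num),
              loopA_stop maxb 112 16 (r ++ [80] ++ [96]) (by omega)]
      · have hI2 := inner_done maxb 128 96 16 (r ++ [80]) (by norm_num) (by norm_num) (by omega)
        rw [hI1, hI2, if_pair_true]
        rw [loopA_cons' maxb 80 16 96 16 r h80 (by decide) (by norm_num) (by norm_num),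
            loopA_stop maxb 96 16 (r ++ [80]) (by omega)]
    · have hI := inner_done maxb 128 80 16 r (by norm_num) (by norm_num) (by omega)
      rw [hI, if_pair_true, loopA_stop maxb 80 16 r (by omega)]
  · rw [loopA_stop maxb 80 16 r (by omega), outer_stop maxb 64 r (by omega)]

-- the region [32,64] (A enters it at b = 48 with step 16)
theorem L32 (maxb : Int) (r : List Int) (hd : maxb ≤ 2147483648) :
    pvLoopA maxb 48 16 r = pvOuter maxb 32 r := by
  by_cases h32 : (32 : Int) ≤ maxb
  · rw [outer_step' maxb 32 16 48 64 r (by norm_num) h32 (by decide) (by norm_num) (by norm_num)]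
    by_cases h48 : (48 : Int) ≤ maxb
    · have hI1 := inner_step' maxb 64 48 16 64 r (by norm_num) (by norm_num) (by omega)
        (by norm_num)
      by_cases h64 : (64 : Int) ≤ maxb
      · have hI2 := inner_step' maxb 64 64 16 80 (r ++ [48]) le_rfl (by norm_num) (by omega)
          (by norm_num)
        have hI3 := inner_exit maxb 64 80 16 (r ++ [48] ++ [64]) (by norm_num)
        rw [hI1, hI2, hI3, if_pair_false]
        rw [loopA_cons' maxb 48 16 64 16 r h48 (by decide) (by norm_num) (by norm_num),
            loopA_cons' maxb 64 16 80 16 (r ++ [48]) h64 (by decide) (by norm_num) (by norm_num)]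
        exact L64 maxb (r ++ [48] ++ [64]) hd
      · have hI2 := inner_done maxb 64 64 16 (r ++ [48]) le_rfl (by norm_num) (by omega)
        rw [hI1, hI2, if_pair_true]
        rw [loopA_cons' maxb 48 16 64 16 r h48 (by decide) (by norm_num) (by norm_num),
            loopA_stop maxb 64 16 (r ++ [48]) (by omega)]
    · have hI := inner_done maxb 64 48 16 r (by norm_num) (by norm_num) (by omega)
      rw [hI, if_pair_true, loopA_stop maxb 48 16 r (by omega)]
  · rw [loopA_stop maxb 48 16 r (by omega), outer_stop maxb 32 r (by omega)]

-- the region [16,32] (A enters it at b = 24 with step 8)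
theorem L16 (maxb : Int) (r : List Int) (hd : maxb ≤ 2147483648) :
    pvLoopA maxb 24 8 r = pvOuter maxb 16 r := by
  by_cases h16 : (16 : Int) ≤ maxb
  · rw [outer_step' maxb 16 8 24 32 r (by norm_num) h16 (by decide) (by norm_num) (by norm_num)]
    by_cases h24 : (24 : Int) ≤ maxb
    · have hI1 := inner_step' maxb 32 24 8 32 r (by norm_num) (by norm_num) (by omega)
        (by norm_num)
      by_cases h32 : (32 : Int) ≤ maxb
      · have hI2 := inner_step' maxb 32 32 8 40 (r ++ [24]) le_rfl (by norm_num) (by omega)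
          (by norm_num)
        have hI3 := inner_exit maxb 32 40 8 (r ++ [24] ++ [32]) (by norm_num)
        rw [hI1, hI2, hI3, if_pair_false]
        rw [loopA_cons' maxb 24 8 32 8 r h24 (by decide) (by norm_num) (by norm_num),
            loopA_cons' maxb 32 8 48 16 (r ++ [24]) h32 (by decide) (by norm_num) (by norm_num)]
        exact L32 maxb (r ++ [24] ++ [32]) hd
      · have hI2 := inner_done maxb 32 32 8 (r ++ [24]) le_rfl (by norm_num) (by omega)
        rw [hI1, hI2, if_pair_true]
        rw [loopA_cons' maxb 24 8 32 8 r h24 (by decide) (by norm_num) (by norm_num),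
            loopA_stop maxb 32 8 (r ++ [24]) (by omega)]
    · have hI := inner_done maxb 32 24 8 r (by norm_num) (by norm_num) (by omega)
      rw [hI, if_pair_true, loopA_stop maxb 24 8 r (by omega)]
  · rw [loopA_stop maxb 24 8 r (by omega), outer_stop maxb 16 r (by omega)]

-- the region [8,16] (A enters it at b = 12 with step 4): the two loops agree from here on
theorem L8 (maxb : Int) (r : List Int) (hd : maxb ≤ 2147483648) :
    pvLoopA maxb 12 4 r = pvOuter maxb 8 r := by
  by_cases h8 : (8 : Int) ≤ maxb
  · rw [outer_step' maxb 8 4 12 16 r (by norm_num) h8 (by decide) (by norm_num) (by norm_num)]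
    by_cases h12 : (12 : Int) ≤ maxb
    · have hI1 := inner_step' maxb 16 12 4 16 r (by norm_num) (by norm_num) (by omega)
        (by norm_num)
      by_cases h16 : (16 : Int) ≤ maxb
      · have hI2 := inner_step' maxb 16 16 4 20 (r ++ [12]) le_rfl (by norm_num) (by omega)
          (by norm_num)
        have hI3 := inner_exit maxb 16 20 4 (r ++ [12] ++ [16]) (by norm_num)
        rw [hI1, hI2, hI3, if_pair_false]
        rw [loopA_cons' maxb 12 4 16 4 r h12 (by decide) (by norm_num) (by norm_num),
            loopA_cons' maxb 16 4 24 8 (r ++ [12]) h16 (by decide) (by norm_num) (by norm_num)]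
        exact L16 maxb (r ++ [12] ++ [16]) hd
      · have hI2 := inner_done maxb 16 16 4 (r ++ [12]) le_rfl (by norm_num) (by omega)
        rw [hI1, hI2, if_pair_true]
        rw [loopA_cons' maxb 12 4 16 4 r h12 (by decide) (by norm_num) (by norm_num),
            loopA_stop maxb 16 4 (r ++ [12]) (by omega)]
    · have hI := inner_done maxb 16 12 4 r (by norm_num) (by norm_num) (by omega)
      rw [hI, if_pair_true, loopA_stop maxb 12 4 r (by omega)]
  · rw [loopA_stop maxb 12 4 r (by omega), outer_stop maxb 8 r (by omega)]

theorem filter_big (m : Int) (h : 8 ≤ m) :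
    pvFast.filter (fun b => decide (b ≤ m)) = pvFast := by
  rw [List.filter_eq_self]
  intro a ha
  simp only [pvFast, List.mem_cons, List.not_mem_nil, or_false] at ha
  simp only [decide_eq_true_eq]
  omega

theorem filter_empty (m : Int) (h : m < 1) :
    pvFast.filter (fun b => decide (b ≤ m)) = [] := by
  rw [List.filter_eq_nil_iff]
  intro a ha
  simp only [pvFast, List.mem_cons, List.not_mem_nil, or_false] at ha
  simp only [decide_eq_true_eq]
  omega

-- ===== VERDICT (by name: the statement is the Claim_ definition above) =====
theorem get_profile_batch_sizes_spec : Claim_equal_get_profile_batch_sizes := by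
  intro m hDom
  unfold Spec_get_profile_batch_sizes get_profile_batch_sizes get_profile_batch_sizes_alt
  have hd : m ≤ 2147483648 := by
    unfold Dom_get_profile_batch_sizes pvDomInt at hDom
    rw [decide_eq_true_eq] at hDom
    exact hDom.2
  by_cases h1 : m < 1
  · rw [filter_empty m h1]
    rfl
  · by_cases h8 : 8 ≤ m
    · rw [filter_big m h8]
      unfold pvMainA pvMainB
      rw [if_neg (by decide : ¬ (pvFast = [])), if_neg (by decide : ¬ (pvFast = []))]
      rw [show pvFast.getLastD 0 + 4 = 12 from by decide]
      rw [L8 m pvFast hd]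
      rfl
    · have hl : 1 ≤ m := by omega
      have hu : m ≤ 7 := by omega
      interval_cases m <;>
        simp [pvMainA, pvMainB, pvEndA, pvEndB, pvFast, List.filter, List.getLastD,
          loopA_stop, outer_stop]
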